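-- pv_equiv track=rewrite | github.com/ynput/ayon-backend | openpype/access/utils.py | path_to_paths
-- ===== SOURCE A (Python) =====
-- def path_to_paths(
--     path: str,
--     include_parents: bool = False,
--     include_self: bool = True,
-- ) -> list[str]:
--     path = path.strip().strip("/")
--     pelms = path.split("/")
--     result = [f'"{path}/%"']
--     if include_parents:
--         for i in range(len(pelms)):
--             result.append(f"\"{'/'.join(pelms[0:i+1])}\"")
--     elif include_self:
--         result.append("/".join(pelms))
--     return result
-- ===== SOURCE B (Python) =====
-- def path_to_paths(
--     path: str,
--     include_parents: bool = False,
--     include_self: bool = True,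
-- ) -> list[str]:
--     path = path.strip().strip("/")
--     result = ['"' + path + '/%"']
--     if include_parents:
--         acc = None
--         for elm in path.split("/"):
--             acc = elm if acc is None else acc + "/" + elm
--             result.append('"' + acc + '"')
--     elif include_self:
--         result.append(path)
--     return result
-- ===== Notes on version B (the rewrite author's own statement) =====
-- stated objective: alternative
-- what changed: The parents branch builds each cumulative prefix incrementally in one accumulating pass (acc = acc + '/' + element) instead of re-slicing and re-joining pelms[0:i+1] for every i, and the self branch appends the stripped path directly instead of re-joining the split.
import Mathlib
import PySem

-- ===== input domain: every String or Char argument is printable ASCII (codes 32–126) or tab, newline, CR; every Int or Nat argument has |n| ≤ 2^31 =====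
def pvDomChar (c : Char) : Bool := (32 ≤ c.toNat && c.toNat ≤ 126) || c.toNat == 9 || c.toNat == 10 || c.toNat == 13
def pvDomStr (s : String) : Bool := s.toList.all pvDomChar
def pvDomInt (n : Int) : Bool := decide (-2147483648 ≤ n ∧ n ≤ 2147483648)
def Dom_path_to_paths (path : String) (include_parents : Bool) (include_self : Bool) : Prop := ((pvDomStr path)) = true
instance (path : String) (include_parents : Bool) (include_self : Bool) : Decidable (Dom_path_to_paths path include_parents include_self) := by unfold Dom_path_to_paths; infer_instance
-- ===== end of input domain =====

-- B replaces A's re-slice-and-join of pelms[0:i+1] at every i by a single accumulating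
-- pass over the components (objective: alternative — one pass instead of per-index re-joins).

-- ===== PORT A =====
-- literal transliteration of A: strip, split, header, then for i in range(len(pelms))
-- append the quoted join of the slice pelms[0:i+1]; elif include_self append the join.
def path_to_paths (path : String) (include_parents : Bool) (include_self : Bool) : List String :=
  let p : List Char := PySem.Chars.stripChars (PySem.Chars.strip path.toList) "/".toList
  let pelms : List (List Char) := PySem.Chars.splitOn p "/".toList
  let result : List String := [String.ofList ('"' :: p ++ "/%\"".toList)]
  if include_parents then
    (PySem.List.pyRange 0 pelms.length 1).foldl
      (fun r i =>
        r ++ [String.ofList ('"' :: PySem.Chars.join "/".toList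
                (PySem.List.slice pelms (some 0) (some (i + 1))) ++ ['"'])])
      result
  else if include_self then
    result ++ [String.ofList (PySem.Chars.join "/".toList pelms)]
  else
    result

-- ===== PORT B =====
-- literal transliteration of B: one fold over the components keeping (acc, result);
-- acc is None before the first component, else the joined prefix so far.
def path_to_paths_alt (path : String) (include_parents : Bool) (include_self : Bool) : List String :=
  let p : List Char := PySem.Chars.stripChars (PySem.Chars.strip path.toList) "/".toList
  let result : List String := [String.ofList ('"' :: p ++ "/%\"".toList)]
  if include_parents then
    ((PySem.Chars.splitOn p "/".toList).foldl
      (fun (st : Option (List Char) × List String) elm =>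
        let acc : List Char :=
          match st.1 with
          | none => elm
          | some a => a ++ '/' :: elm
        (some acc, st.2 ++ [String.ofList ('"' :: acc ++ ['"'])]))
      (none, result)).2
  else if include_self then
    result ++ [String.ofList p]
  else
    result

-- ===== PRECONDITION & SPEC =====
def Spec_path_to_paths (path : String) (include_parents : Bool) (include_self : Bool) (out : List String) : Prop := out = path_to_paths_alt path include_parents include_self
instance (path : String) (include_parents : Bool) (include_self : Bool) (out : List String) : Decidable (Spec_path_to_paths path include_parents include_self out) := by unfold Spec_path_to_paths; infer_instance

-- ===== CLAIM (what is proved, stated in full; the proofs are below) =====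
def Claim_equal_path_to_paths : Prop := ∀ (path : String) (include_parents : Bool) (include_self : Bool), Dom_path_to_paths path include_parents include_self → Spec_path_to_paths path include_parents include_self (path_to_paths path include_parents include_self)

-- ===== LEMMAS AND PROOFS =====

theorem pv_join_append_singleton (xs : List (List Char)) (y : List Char) :
    PySem.Chars.join "/".toList (xs ++ [y]) =
      PySem.Chars.join "/".toList xs ++ (if xs = [] then [] else "/".toList) ++ y := by
  induction xs with
  | nil => simp [PySem.Chars.join_nil, PySem.Chars.join_singleton]
  | cons a t ih =>
    cases t with
    | nil => simp [PySem.Chars.join_singleton, PySem.Chars.join_cons_cons]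
    | cons b t' =>
      have h1 : (a :: b :: t') ++ [y] = a :: ((b :: t') ++ [y]) := by simp
      rw [h1]
      have h2 : (b :: t') ++ [y] = b :: (t' ++ [y]) := by simp
      rw [h2, PySem.Chars.join_cons_cons, ← h2, ih, PySem.Chars.join_cons_cons]
      simp

theorem pv_go_join (fuel : Nat) : ∀ (l cur : List Char) (acc : List (List Char)),
    l.length < fuel →
    PySem.Chars.join "/".toList (PySem.Chars.splitOn.go "/".toList fuel l cur acc) =
      PySem.Chars.join "/".toList acc.reverse ++
        (if acc = [] then [] else "/".toList) ++ cur.reverse ++ l := by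
  induction fuel with
  | zero => intro l cur acc h; omega
  | succ fuel ih =>
    intro l cur acc h
    cases l with
    | nil =>
      show PySem.Chars.join "/".toList ((cur.reverse :: acc).reverse) = _
      rw [List.reverse_cons, pv_join_append_singleton]
      simp
    | cons c rest =>
      show PySem.Chars.join "/".toList
          (if (['/'] : List Char).isPrefixOf (c :: rest) = true then
            PySem.Chars.splitOn.go "/".toList fuel (List.drop 1 (c :: rest)) [] (cur.reverse :: acc)
          else PySem.Chars.splitOn.go "/".toList fuel rest (c :: cur) acc) = _
      by_cases hc : c = '/'
      · subst hc
        rw [if_pos (by simp [List.isPrefixOf])]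
        simp only [List.drop_succ_cons, List.drop_zero]
        rw [ih rest [] (cur.reverse :: acc) (by simp at h ⊢; omega)]
        rw [List.reverse_cons, pv_join_append_singleton]
        simp
      · rw [if_neg (by simp only [List.isPrefixOf, Bool.and_eq_true, beq_iff_eq]; exact fun h => hc h.1.symm)]
        rw [ih rest (c :: cur) acc (by simp at h ⊢; omega)]
        simp

-- split-then-join gives back the string
theorem pv_join_splitOn (p : List Char) :
    PySem.Chars.join "/".toList (PySem.Chars.splitOn p "/".toList) = p := by
  show PySem.Chars.join "/".toList (PySem.Chars.splitOn.go "/".toList (p.length + 1) p [] []) = p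
  rw [pv_go_join (p.length + 1) p [] [] (by omega)]
  simp [PySem.Chars.join_nil]

theorem pv_go_ne_nil (fuel : Nat) : ∀ (l cur : List Char) (acc : List (List Char)),
    PySem.Chars.splitOn.go "/".toList fuel l cur acc ≠ [] := by
  induction fuel with
  | zero => intro l cur acc; cases l <;> simp [PySem.Chars.splitOn.go]
  | succ fuel ih =>
    intro l cur acc
    cases l with
    | nil => simp [PySem.Chars.splitOn.go]
    | cons c rest =>
      show (if (['/'] : List Char).isPrefixOf (c :: rest) = true then
            PySem.Chars.splitOn.go "/".toList fuel (List.drop 1 (c :: rest)) [] (cur.reverse :: acc)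
          else PySem.Chars.splitOn.go "/".toList fuel rest (c :: cur) acc) ≠ []
      split <;> apply ih

-- A's loop: appending f i for each i of a list is init ++ map
theorem pv_foldl_append_map {α β : Type} (l : List α) (f : α → β) :
    ∀ (init : List β), l.foldl (fun r i => r ++ [f i]) init = init ++ l.map f := by
  induction l with
  | nil => simp
  | cons a t ih => intro init; simp [List.foldl_cons, ih]

-- B's loop after the first component (acc = some a): each step quotes one more prefix
theorem pv_foldl_some :
    ∀ (l : List (List Char)) (a : List Char) (r : List String),
      (l.foldl
        (fun (st : Option (List Char) × List String) elm =>
          let acc : List Char :=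
            match st.1 with
            | none => elm
            | some a => a ++ '/' :: elm
          (some acc, st.2 ++ [String.ofList ('"' :: acc ++ ['"'])]))
        (some a, r)).2 =
      r ++ (List.range l.length).map
        (fun i => String.ofList ('"' :: (a ++ '/' :: PySem.Chars.join "/".toList (l.take (i + 1))) ++ ['"'])) := by
  intro l
  induction l with
  | nil => intro a r; simp
  | cons e t ih =>
    intro a r
    have h1 :
        ((e :: t).foldl
          (fun (st : Option (List Char) × List String) elm =>
            let acc : List Char :=
              match st.1 with
              | none => elm
              | some a => a ++ '/' :: elm
            (some acc, st.2 ++ [String.ofList ('"' :: acc ++ ['"'])]))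
          (some a, r)).2 =
        (t.foldl
          (fun (st : Option (List Char) × List String) elm =>
            let acc : List Char :=
              match st.1 with
              | none => elm
              | some a => a ++ '/' :: elm
            (some acc, st.2 ++ [String.ofList ('"' :: acc ++ ['"'])]))
          (some (a ++ '/' :: e), r ++ [String.ofList ('"' :: (a ++ '/' :: e) ++ ['"'])])).2 := rfl
    rw [h1, ih]
    rw [List.length_cons, List.range_succ_eq_map]
    simp only [List.map_cons, List.map_map, List.append_assoc]
    congr 1
    rw [List.singleton_append]
    congr 1
    · congr 2
      simp [PySem.Chars.join_singleton]
    apply List.map_congr_left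
    intro i hi
    simp only [Function.comp]
    have htake : (e :: t).take (i + 1 + 1) = e :: t.take (i + 1) := by simp
    rw [htake]
    have hne : t.take (i + 1) ≠ [] := by
      simp at hi
      intro hcontra
      rw [List.take_eq_nil_iff] at hcontra
      rcases hcontra with h' | h'
      · omega
      · subst h'; simp at hi
    obtain ⟨b, t', hbt⟩ := List.exists_cons_of_ne_nil hne
    rw [hbt, PySem.Chars.join_cons_cons]
    simp

-- the two parents branches agree
theorem pv_parents_eq (p : List Char) (result : List String) :
    (PySem.List.pyRange 0 (PySem.Chars.splitOn p "/".toList).length 1).foldl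
      (fun r i =>
        r ++ [String.ofList ('"' :: PySem.Chars.join "/".toList
                (PySem.List.slice (PySem.Chars.splitOn p "/".toList) (some 0) (some (i + 1))) ++ ['"'])])
      result =
    ((PySem.Chars.splitOn p "/".toList).foldl
      (fun (st : Option (List Char) × List String) elm =>
        let acc : List Char :=
          match st.1 with
          | none => elm
          | some a => a ++ '/' :: elm
        (some acc, st.2 ++ [String.ofList ('"' :: acc ++ ['"'])]))
      (none, result)).2 := by
  have hne : PySem.Chars.splitOn p "/".toList ≠ [] := pv_go_ne_nil _ _ _ _
  obtain ⟨e, t, het⟩ := List.exists_cons_of_ne_nil hne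
  rw [het, pv_foldl_append_map]
  -- LHS: turn the int range into a nat range and the slices into takes
  have hrange : PySem.List.pyRange 0 ((e :: t).length : Int) 1 =
      (List.range (e :: t).length).map (fun k : Nat => ((k : Int))) := by
    rw [PySem.List.pyRange_one]
    simp
  rw [hrange, List.map_map]
  have hslice : ∀ i ∈ List.range (e :: t).length,
      ((fun r => String.ofList ('"' :: PySem.Chars.join "/".toList
          (PySem.List.slice (e :: t) (some 0) (some (r + 1))) ++ ['"'])) ∘ (fun k : Nat => ((k : Int)))) i
      = String.ofList ('"' :: PySem.Chars.join "/".toList ((e :: t).take (i + 1)) ++ ['"']) := by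
    intro i _
    simp only [Function.comp]
    congr 3
    rw [PySem.List.slice_toNat _ (by norm_num) (by positivity)]
    simp
  rw [List.map_congr_left hslice]
  -- RHS: peel the first step (acc none → some e), then pv_foldl_some
  have h0 :
      ((e :: t).foldl
        (fun (st : Option (List Char) × List String) elm =>
          let acc : List Char :=
            match st.1 with
            | none => elm
            | some a => a ++ '/' :: elm
          (some acc, st.2 ++ [String.ofList ('"' :: acc ++ ['"'])]))
        (none, result)).2 =
      (t.foldl
        (fun (st : Option (List Char) × List String) elm =>
          let acc : List Char :=
            match st.1 with
            | none => elm
            | some a => a ++ '/' :: elm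
          (some acc, st.2 ++ [String.ofList ('"' :: acc ++ ['"'])]))
        (some e, result ++ [String.ofList ('"' :: e ++ ['"'])])).2 := rfl
  rw [h0, pv_foldl_some t e (result ++ [String.ofList ('"' :: e ++ ['"'])])]
  -- both sides: result ++ (quoted prefixes over range (t.length + 1))
  rw [List.length_cons, List.range_succ_eq_map]
  simp only [List.map_cons, List.map_map, List.append_assoc]
  congr 1
  rw [List.singleton_append]
  congr 1
  · congr 3
    simp [PySem.Chars.join_singleton]
  apply List.map_congr_left
  intro i hi
  simp only [Function.comp]
  have htake : (e :: t).take (i + 1 + 1) = e :: t.take (i + 1) := by simp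
  rw [htake]
  have hne2 : t.take (i + 1) ≠ [] := by
    simp at hi
    intro hcontra
    rw [List.take_eq_nil_iff] at hcontra
    rcases hcontra with h' | h'
    · omega
    · subst h'; simp at hi
  obtain ⟨b, t', hbt⟩ := List.exists_cons_of_ne_nil hne2
  rw [hbt, PySem.Chars.join_cons_cons]
  simp

-- ===== VERDICT (by name: the statement is the Claim_ definition above) =====
theorem path_to_paths_spec : Claim_equal_path_to_paths := by
  intro path include_parents include_self _
  unfold Spec_path_to_paths path_to_paths path_to_paths_alt
  cases include_parents with
  | true =>
    simp only [if_pos rfl]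
    exact pv_parents_eq _ _
  | false =>
    cases include_self with
    | true =>
      simp only [Bool.false_eq_true, ite_false, if_pos rfl]
      rw [pv_join_splitOn]
    | false => simp
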